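-- pv_equiv track=rewrite | github.com/EpicRolandCoder/Python-Calculator | !Tolerant Hundred Line Calculator (pemdas).py | innerbrackets
-- ===== SOURCE A (Python) =====
-- def innerbrackets(numsent, clopen):
--     result = []
--     numsent.reverse()
--     result.append(len(numsent) - (numsent.index("(")+1))
--     numsent.reverse()
--     for i, value in enumerate(numsent):
--         if i > result[0]:
--             if value == ")":
--                 result.append(i)
--     if clopen == "open":
--         return result[0]
--     if clopen == "closed":
--         return result[1]
-- ===== SOURCE B (Python) =====
-- def innerbrackets(numsent, clopen):
--     open_idx = None
--     close_idx = None
--     for i, v in enumerate(numsent):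
--         if v == "(":
--             open_idx = i
--             close_idx = None
--         elif v == ")" and close_idx is None:
--             close_idx = i
--     if open_idx is None:
--         raise ValueError("'(' is not in list")
--     if clopen == "open":
--         return open_idx
--     if clopen == "closed":
--         if close_idx is None:
--             raise IndexError("list index out of range")
--         return close_idx
--     return None
-- ===== Notes on version B (the rewrite author's own statement) =====
-- stated objective: alternative
-- what changed: A reverses the list, does a linear .index search for '(' and then a second full enumerate pass collecting every ')' after it; B does one forward pass maintaining two registers (last '(' seen, first ')' after it), with no reversal, no list of results and early state resets.
import Mathlib
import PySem

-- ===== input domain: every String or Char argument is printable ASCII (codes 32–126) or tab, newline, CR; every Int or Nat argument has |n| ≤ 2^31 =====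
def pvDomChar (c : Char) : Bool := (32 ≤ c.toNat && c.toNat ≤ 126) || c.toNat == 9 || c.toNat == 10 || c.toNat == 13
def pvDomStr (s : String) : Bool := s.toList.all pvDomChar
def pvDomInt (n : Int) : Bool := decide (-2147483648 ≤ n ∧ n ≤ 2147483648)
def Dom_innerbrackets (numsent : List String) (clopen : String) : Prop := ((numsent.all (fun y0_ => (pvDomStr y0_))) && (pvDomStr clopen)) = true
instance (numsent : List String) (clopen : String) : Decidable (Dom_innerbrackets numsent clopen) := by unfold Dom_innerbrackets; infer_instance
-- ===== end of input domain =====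

-- B replaces A's reverse/.index search plus a second collecting pass by ONE forward pass keeping
-- two registers (last '(' seen, first ')' after it).  A transiently reverses numsent in place but
-- restores it before returning, so the net side effect is nil; the claim is about the return value.

-- ===== PORT A =====
def innerbrackets (numsent : List String) (clopen : String) : Option Int :=
  -- result = []; numsent.reverse(); result.append(len(numsent) - (numsent.index("(")+1)); numsent.reverse()
  match PySem.List.index? numsent.reverse "(" with
  | none => none      -- Python raises ValueError here; excluded by Pre_innerbrackets
  | some j =>
    let r0 : Int := (numsent.length : Int) - ((j : Int) + 1)
    -- for i, value in enumerate(numsent): if i > result[0]: if value == ")": result.append(i)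
    let result : List Int :=
      (PySem.List.enumerate numsent 0).foldl
        (fun acc iv => if iv.1 > r0 then (if iv.2 = ")" then acc ++ [iv.1] else acc) else acc)
        [r0]
    if clopen = "open" then some r0
    else if clopen = "closed" then PySem.List.pyGet? result 1   -- result[1]; none = IndexError, excluded by Pre_
    else none

-- ===== PORT B =====
def stepB (st : Option Int × Option Int) (iv : Int × String) : Option Int × Option Int :=
  if iv.2 = "(" then (some iv.1, none)
  else if iv.2 = ")" ∧ st.2 = none then (st.1, some iv.1)
  else st

def innerbrackets_alt (numsent : List String) (clopen : String) : Option Int :=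
  let st := (PySem.List.enumerate numsent 0).foldl stepB (none, none)
  match st.1 with
  | none => none      -- Python B raises ValueError here; excluded by Pre_innerbrackets
  | some o =>
    if clopen = "open" then some o
    else if clopen = "closed" then st.2   -- none = IndexError in Python B, excluded by Pre_
    else none

-- ===== PRECONDITION & SPEC =====
-- Pre_ excludes exactly the inputs where Python A raises (and Python B raises the same exceptions):
-- ValueError when "(" is absent, IndexError when clopen = "closed" and no ")" follows the last "(".
def Pre_innerbrackets (numsent : List String) (clopen : String) : Prop :=
  "(" ∈ numsent ∧
    (clopen = "closed" → ")" ∈ numsent.drop (numsent.length - numsent.reverse.idxOf "("))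
instance (numsent : List String) (clopen : String) : Decidable (Pre_innerbrackets numsent clopen) := by
  unfold Pre_innerbrackets; infer_instance

def pvWitness_innerbrackets : List String × String := (["(", "1", ")"], "closed")

def Spec_innerbrackets (numsent : List String) (clopen : String) (out : Option Int) : Prop := out = innerbrackets_alt numsent clopen
instance (numsent : List String) (clopen : String) (out : Option Int) : Decidable (Spec_innerbrackets numsent clopen out) := by unfold Spec_innerbrackets; infer_instance

-- ===== CLAIM (what is proved, stated in full; the proofs are below) =====
def Claim_equal_innerbrackets : Prop := ∀ (numsent : List String) (clopen : String), Dom_innerbrackets numsent clopen → Pre_innerbrackets numsent clopen → Spec_innerbrackets numsent clopen (innerbrackets numsent clopen)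

-- ===== LEMMAS AND PROOFS =====

-- reference functions for the proof: index of the LAST "(" and of the FIRST ")"
def lastP : List String → Option Nat
  | [] => none
  | x :: xs =>
    match lastP xs with
    | some k => some (k + 1)
    | none => if x = "(" then some 0 else none

def firstC : List String → Option Nat
  | [] => none
  | x :: xs => if x = ")" then some 0 else (firstC xs).map (· + 1)

theorem lastP_isSome_iff (l : List String) : (lastP l).isSome ↔ "(" ∈ l := by
  induction l with
  | nil => simp [lastP]
  | cons x xs ih =>
    simp only [lastP, List.mem_cons]
    cases h : lastP xs with
    | some k =>
      rw [h] at ih; simp at ih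
      simp [ih]
    | none =>
      rw [h] at ih; simp at ih
      by_cases hx : x = "("
      · simp [hx]
      · rw [if_neg hx]
        simp only [Option.isSome_none, Bool.false_eq_true, false_iff, not_or]
        exact ⟨fun hh => hx (Eq.symm hh), ih⟩

theorem lastP_lt (l : List String) (L : Nat) (h : lastP l = some L) : L < l.length := by
  induction l generalizing L with
  | nil => simp [lastP] at h
  | cons x xs ih =>
    simp only [lastP] at h
    cases h' : lastP xs with
    | some k =>
      rw [h'] at h; simp only [Option.some.injEq] at h
      have := ih k h'; simp; omega
    | none =>
      rw [h'] at h
      by_cases hx : x = "("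
      · rw [if_pos hx] at h
        simp only [Option.some.injEq] at h
        simp; omega
      · rw [if_neg hx] at h
        exact absurd h (by simp)

theorem index?_reverse_eq (l : List String) :
    PySem.List.index? l.reverse "(" = (lastP l).map (fun L => l.length - 1 - L) := by
  induction l with
  | nil => simp [lastP, PySem.List.index?_eq_idxOf?]
  | cons x xs ih =>
    rw [List.reverse_cons]
    by_cases hm : "(" ∈ xs
    · obtain ⟨L, hL⟩ := Option.isSome_iff_exists.mp ((lastP_isSome_iff xs).mpr hm)
      have hlt := lastP_lt xs L hL
      have hcons : lastP (x :: xs) = some (L + 1) := by simp [lastP, hL]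
      rw [PySem.List.index?_append_of_mem [x] (by simpa using hm), ih, hL, hcons]
      simp only [Option.map_some, Option.some.injEq, List.length_cons]
      omega
    · have hns : lastP xs = none := by
        cases h : lastP xs with
        | none => rfl
        | some k => exact absurd ((lastP_isSome_iff xs).mp (by simp [h])) hm
      by_cases hx : x = "("
      · subst hx
        have hcons : lastP ("(" :: xs) = some 0 := by simp [lastP, hns]
        rw [PySem.List.index?_append_singleton_self xs.reverse "(" (by simpa using hm), hcons]
        simp
      · have hcons : lastP (x :: xs) = none := by simp [lastP, hns, hx]
        have hnot : "(" ∉ xs.reverse ++ [x] := by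
          simp only [List.mem_append, List.mem_reverse, List.mem_singleton]
          rintro (h | h)
          · exact hm h
          · exact hx h.symm
        rw [(PySem.List.index?_eq_none_iff _ _).mpr hnot, hcons]
        rfl

-- A's collecting loop, as filter-and-map (over any enumerated list)
theorem foldA_eq (l : List (Int × String)) (r0 : Int) (init : List Int) :
    l.foldl (fun acc iv => if iv.1 > r0 then (if iv.2 = ")" then acc ++ [iv.1] else acc) else acc) init
      = init ++ (l.filter (fun iv => decide (iv.1 > r0 ∧ iv.2 = ")"))).map (·.1) := by
  induction l generalizing init with
  | nil => simp
  | cons x xs ih =>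
    simp only [List.foldl_cons, List.filter_cons]
    by_cases h1 : x.1 > r0 <;> by_cases h2 : x.2 = ")" <;> simp [h1, h2, ih]

theorem filter_enum_nil (l : List String) (s L : Int) (h : s + (l.length : Int) ≤ L + 1) :
    (PySem.List.enumerate l s).filter (fun iv => decide (iv.1 > L ∧ iv.2 = ")")) = [] := by
  induction l generalizing s with
  | nil => simp [PySem.List.enumerate_nil]
  | cons x xs ih =>
    rw [PySem.List.enumerate_cons]
    simp only [List.filter_cons]
    rw [if_neg (by simp only [List.length_cons] at h; simp; intro hs; omega)]
    exact ih (s + 1) (by simp only [List.length_cons] at h; push_cast at h ⊢; omega)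

theorem filter_enum_head (l : List String) (s L : Int) (h : L < s) :
    List.head? (((PySem.List.enumerate l s).filter
        (fun iv => decide (iv.1 > L ∧ iv.2 = ")"))).map (·.1))
      = (firstC l).map (fun k => s + (k : Int)) := by
  induction l generalizing s with
  | nil => simp [PySem.List.enumerate_nil, firstC]
  | cons x xs ih =>
    rw [PySem.List.enumerate_cons]
    simp only [List.filter_cons, firstC]
    by_cases hx : x = ")"
    · rw [if_pos (by simp [hx, h])]
      simp [hx]
    · rw [if_neg (by simp [hx])]
      rw [ih (s + 1) (by omega)]
      cases hf : firstC xs with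
      | none => simp [hx]
      | some k => simp [hx]; push_cast; ring

-- B's single forward pass, fully characterised
theorem foldB_eq (l : List String) (s : Int) (o c : Option Int) :
    (PySem.List.enumerate l s).foldl stepB (o, c) =
      match lastP l with
      | some L => (some (s + (L : Int)),
          (firstC (l.drop (L + 1))).map (fun k => s + (L : Int) + 1 + (k : Int)))
      | none => (o, match c with
          | some v => some v
          | none => (firstC l).map (fun k => s + (k : Int))) := by
  induction l generalizing s o c with
  | nil => cases c <;> simp [PySem.List.enumerate_nil, lastP, firstC]
  | cons x xs ih =>
    rw [PySem.List.enumerate_cons, List.foldl_cons]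
    by_cases hx : x = "("
    · have hstep : stepB (o, c) (s, x) = (some s, none) := by simp [stepB, hx]
      rw [hstep, ih]
      cases hl : lastP xs with
      | some k =>
        have hcons : lastP (x :: xs) = some (k + 1) := by simp [lastP, hl]
        simp only [hl, hcons, List.drop_succ_cons, Prod.mk.injEq, Option.some.injEq]
        refine ⟨by push_cast; ring, Option.map_congr (fun a _ => by push_cast; ring)⟩
      | none =>
        have hcons : lastP (x :: xs) = some 0 := by simp [lastP, hl, hx]
        simp only [hl, hcons, List.drop_succ_cons, List.drop_zero, Prod.mk.injEq,
          Option.some.injEq, Nat.cast_zero]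
        refine ⟨by ring, Option.map_congr (fun a _ => by push_cast; ring)⟩
    · by_cases hc : x = ")" ∧ c = none
      · have hstep : stepB (o, c) (s, x) = (o, some s) := by simp [stepB, hx, hc.1, hc.2]
        rw [hstep, ih]
        cases hl : lastP xs with
        | some k =>
          have hcons : lastP (x :: xs) = some (k + 1) := by simp [lastP, hl]
          simp only [hl, hcons, List.drop_succ_cons, Prod.mk.injEq, Option.some.injEq]
          refine ⟨by push_cast; ring, Option.map_congr (fun a _ => by push_cast; ring)⟩
        | none =>
          have hcons : lastP (x :: xs) = none := by simp [lastP, hl, hx]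
          have hfc : firstC (x :: xs) = some 0 := by simp [firstC, hc.1]
          simp only [hl, hcons, hc.2, hfc, Option.map_some, Nat.cast_zero, add_zero]
          simp
      · have hstep : stepB (o, c) (s, x) = (o, c) := by
          simp only [stepB]
          rw [if_neg (by simp [hx]), if_neg (by simpa using hc)]
        rw [hstep, ih]
        cases hl : lastP xs with
        | some k =>
          have hcons : lastP (x :: xs) = some (k + 1) := by simp [lastP, hl]
          simp only [hl, hcons, List.drop_succ_cons, Prod.mk.injEq, Option.some.injEq]
          refine ⟨by push_cast; ring, Option.map_congr (fun a _ => by push_cast; ring)⟩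
        | none =>
          have hcons : lastP (x :: xs) = none := by simp [lastP, hl, hx]
          cases c with
          | some v => simp only [hl, hcons]
          | none =>
            have hxc : x ≠ ")" := fun hxx => hc ⟨hxx, rfl⟩
            have hfc : firstC (x :: xs) = (firstC xs).map (· + 1) := by simp [firstC, hxc]
            simp only [hl, hcons, hfc]
            cases hf : firstC xs with
            | none => simp
            | some k => simp; push_cast; ring

theorem pyGet?_cons_one (a : Int) (t : List Int) : PySem.List.pyGet? (a :: t) 1 = t[0]? := by
  cases t <;> simp [PySem.List.pyGet?, PySem.List.pyIdx?]

-- ===== VERDICT (by name: the statement is the Claim_ definition above) =====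
theorem innerbrackets_spec : Claim_equal_innerbrackets := by
  intro numsent clopen _ _
  unfold Spec_innerbrackets
  simp only [innerbrackets, innerbrackets_alt]
  rw [index?_reverse_eq, foldB_eq]
  cases hl : lastP numsent with
  | none => simp [hl]
  | some L =>
    have hLlt := lastP_lt numsent L hl
    simp only [hl, Option.map_some]
    have hr0 : (numsent.length : Int) - ((↑(numsent.length - 1 - L) : Int) + 1) = (L : Int) := by
      omega
    rw [hr0]
    by_cases ho : clopen = "open"
    · simp [ho]
    · by_cases hc : clopen = "closed"
      · simp only [ho, if_false, hc, if_true]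
        rw [foldA_eq]
        rw [List.singleton_append, pyGet?_cons_one, ← List.head?_eq_getElem?]
        have hsplit : numsent = numsent.take (L + 1) ++ numsent.drop (L + 1) :=
          (List.take_append_drop _ _).symm
        have htlen : (numsent.take (L + 1)).length = L + 1 := by simp; omega
        conv_lhs => rw [hsplit]
        rw [PySem.List.enumerate_append, List.filter_append,
            filter_enum_nil _ 0 (L : Int) (by rw [htlen]; push_cast; omega),
            htlen, List.nil_append]
        rw [show ((0 : Int) + ((L + 1 : Nat) : Int)) = (L : Int) + 1 by push_cast; ring]
        rw [filter_enum_head _ ((L : Int) + 1) (L : Int) (by omega)]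
        exact Option.map_congr (fun a _ => by push_cast; ring)
      · simp [ho, hc]
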